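-- pv_equiv track=rewrite | github.com/prodante/algorithms_python | les_3_task_5.py | search_max
-- ===== SOURCE A (Python) =====
-- def search_max(arr):
--     for i in range(len(arr)):
--         if arr[i] < 0:
--             max_i = i   # первый отрицательный элемент в массиве
--             break
--     for i, item in enumerate(arr):
--         if item < 0:
--             if item > arr[max_i]:
--                 max_i = i
--     return max_i
-- ===== SOURCE B (Python) =====
-- def search_max(arr):
--     return arr.index(max([x for x in arr if x < 0]))
-- ===== Notes on version B (the rewrite author's own statement) =====
-- stated objective: idiomatic
-- what changed: Replaces A's index-tracking scans by the builtin pipeline filter-negatives -> max -> arr.index (first occurrence of the maximal negative), with no hand-maintained best-index state at all.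
import Mathlib
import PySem

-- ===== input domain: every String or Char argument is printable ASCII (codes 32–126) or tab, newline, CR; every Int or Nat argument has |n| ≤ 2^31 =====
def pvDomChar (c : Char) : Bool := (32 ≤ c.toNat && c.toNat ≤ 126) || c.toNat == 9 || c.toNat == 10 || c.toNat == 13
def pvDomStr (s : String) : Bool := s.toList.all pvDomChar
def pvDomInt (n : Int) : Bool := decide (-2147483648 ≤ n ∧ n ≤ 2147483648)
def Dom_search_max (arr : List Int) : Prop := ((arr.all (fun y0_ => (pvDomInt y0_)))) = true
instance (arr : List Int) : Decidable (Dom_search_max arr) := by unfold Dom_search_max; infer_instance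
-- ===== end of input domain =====

-- B replaces A's index-tracking scans by the builtin pipeline filter-negatives -> max -> arr.index (objective: idiomatic).
-- On inputs with no negative element both Pythons raise (A: UnboundLocalError, B: ValueError); those inputs are outside Pre_.

-- ===== PORT A =====
-- first loop: 'for i in range(len(arr)): if arr[i] < 0: max_i = i; break' — none = max_i never assigned
def aFirst : List Int → Int → Option Int
  | [], _ => none
  | x :: xs, i => if x < 0 then some i else aFirst xs (i + 1)

-- second loop: 'for i, item in enumerate(arr): …' ; arr[max_i] via pyGet? (always in range here)
def aLoop (arr : List Int) : List Int → Int → Int → Int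
  | [], _, mi => mi
  | x :: xs, i, mi =>
      aLoop arr xs (i + 1)
        (if x < 0 then (if x > (PySem.List.pyGet? arr mi).getD 0 then i else mi) else mi)

def search_max (arr : List Int) : Int :=
  match aFirst arr 0 with
  | some m0 => aLoop arr arr 0 m0
  | none => 0   -- Python raises UnboundLocalError here; excluded by Pre_search_max

-- ===== PORT B =====
-- 'return arr.index(max([x for x in arr if x < 0]))'
def search_max_alt (arr : List Int) : Int :=
  match PySem.List.max? (arr.filter (fun x => decide (x < 0))) (fun y => y) with
  | some m =>
      match PySem.List.index? arr m with
      | some k => (k : Int)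
      | none => 0   -- unreachable: the max of a sublist of arr is in arr
  | none => 0   -- Python raises ValueError here; excluded by Pre_search_max

-- ===== PRECONDITION & SPEC =====
-- Pre_ excludes exactly the inputs with no negative element, on which both Pythons raise.
def Pre_search_max (arr : List Int) : Prop := ∃ x ∈ arr, x < 0
instance (arr : List Int) : Decidable (Pre_search_max arr) := by unfold Pre_search_max; infer_instance
def pvWitness_search_max : List Int := [3, -2, -5, -2]

def Spec_search_max (arr : List Int) (out : Int) : Prop := out = search_max_alt arr
instance (arr : List Int) (out : Int) : Decidable (Spec_search_max arr out) := by unfold Spec_search_max; infer_instance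

-- ===== CLAIM (what is proved, stated in full; the proofs are below) =====
def Claim_equal_search_max : Prop := ∀ (arr : List Int), Dom_search_max arr → Pre_search_max arr → Spec_search_max arr (search_max arr)

-- ===== LEMMAS AND PROOFS =====

-- proof-side bridge: a single argmax pass carrying the best (index, value) pair
def bLoop : List Int → Int → Option (Int × Int) → Option (Int × Int)
  | [], _, st => st
  | x :: xs, i, st =>
      bLoop xs (i + 1)
        (match st with
         | none => if x < 0 then some (i, x) else none
         | some (bi, bv) => if x < 0 ∧ x > bv then some (i, x) else some (bi, bv))

lemma pyGet_at_split (pre : List Int) (x : Int) (post : List Int) :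
    PySem.List.pyGet? (pre ++ x :: post) ((pre.length : Int)) = some x := by
  rw [PySem.List.pyGet?_natCast]
  simp

-- A-side phase 2: once the best pair is established, aLoop and bLoop move in lockstep
lemma phase2 (arr : List Int) :
    ∀ (xs pre : List Int) (mi v : Int), arr = pre ++ xs →
      PySem.List.pyGet? arr mi = some v →
      ∃ w, bLoop xs (pre.length) (some (mi, v)) = some (aLoop arr xs (pre.length) mi, w) ∧
        PySem.List.pyGet? arr (aLoop arr xs (pre.length) mi) = some w := by
  intro xs
  induction xs with
  | nil => intro pre mi v _ hv; exact ⟨v, rfl, hv⟩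
  | cons x rest ih =>
    intro pre mi v harr hv
    have hx : PySem.List.pyGet? arr ((pre.length : Int)) = some x := harr ▸ pyGet_at_split pre x rest
    have harr' : arr = (pre ++ [x]) ++ rest := by simp [harr]
    have hlen : ((pre.length : Int) + 1) = (((pre ++ [x]).length : Nat) : Int) := by
      simp
    by_cases hneg : x < 0
    · by_cases hgt : x > v
      · have := ih (pre ++ [x]) (pre.length) x harr' hx
        rw [← hlen] at this
        simpa [bLoop, aLoop, hneg, hgt, hv] using this
      · have := ih (pre ++ [x]) mi v harr' hv
        rw [← hlen] at this
        simpa [bLoop, aLoop, hneg, hgt, hv] using this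
    · have := ih (pre ++ [x]) mi v harr' hv
      rw [← hlen] at this
      simpa [bLoop, aLoop, hneg, hv] using this

-- A-side phase 1: before the first negative, aLoop skips and bLoop's state stays none
lemma phase1 (arr : List Int) :
    ∀ (xs pre : List Int) (m0 : Int), arr = pre ++ xs →
      aFirst xs (pre.length) = some m0 →
      ∃ w, bLoop xs (pre.length) none = some (aLoop arr xs (pre.length) m0, w) := by
  intro xs
  induction xs with
  | nil => intro pre m0 _ h; simp [aFirst] at h
  | cons x rest ih =>
    intro pre m0 harr hfirst
    have hx : PySem.List.pyGet? arr ((pre.length : Int)) = some x := harr ▸ pyGet_at_split pre x rest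
    have harr' : arr = (pre ++ [x]) ++ rest := by simp [harr]
    have hlen : ((pre.length : Int) + 1) = (((pre ++ [x]).length : Nat) : Int) := by
      simp
    by_cases hneg : x < 0
    · have hm0 : m0 = (pre.length : Int) := by
        simp [aFirst, hneg] at hfirst; omega
      subst hm0
      have := phase2 arr rest (pre ++ [x]) (pre.length) x harr' hx
      rw [← hlen] at this
      obtain ⟨w, hb, _⟩ := this
      exact ⟨w, by simpa [bLoop, aLoop, hneg, hx] using hb⟩
    · have hfirst' : aFirst rest (((pre ++ [x]).length : Nat) : Int) = some m0 := by
        rw [← hlen]; simpa [aFirst, hneg] using hfirst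
      have := ih (pre ++ [x]) m0 harr' hfirst'
      rw [← hlen] at this
      simpa [bLoop, aLoop, hneg] using this

lemma aFirst_isSome (xs : List Int) (i : Int) (h : ∃ x ∈ xs, x < 0) :
    ∃ m0, aFirst xs i = some m0 := by
  induction xs generalizing i with
  | nil => simp at h
  | cons x rest ih =>
    by_cases hneg : x < 0
    · exact ⟨i, by simp [aFirst, hneg]⟩
    · obtain ⟨y, hy, hylt⟩ := h
      rcases List.mem_cons.mp hy with rfl | hy'
      · exact absurd hylt hneg
      · obtain ⟨m0, hm0⟩ := ih (i + 1) ⟨y, hy', hylt⟩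
        exact ⟨m0, by simpa [aFirst, hneg] using hm0⟩

-- B-side invariant: bLoop's state is (first index of the max negative of the prefix, that max)
lemma bInv (arr : List Int) :
    ∀ (xs p : List Int) (k : Nat) (bv : Int), arr = p ++ xs →
      bv ∈ p.filter (fun x => decide (x < 0)) →
      (∀ y ∈ p.filter (fun x => decide (x < 0)), y ≤ bv) →
      PySem.List.index? arr bv = some k →
      ∃ (k' : Nat) (bv' : Int),
        bLoop xs (p.length) (some ((k : Int), bv)) = some ((k' : Int), bv') ∧
        bv' ∈ arr.filter (fun x => decide (x < 0)) ∧
        (∀ y ∈ arr.filter (fun x => decide (x < 0)), y ≤ bv') ∧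
        PySem.List.index? arr bv' = some k' := by
  intro xs
  induction xs with
  | nil =>
    intro p k bv harr hmem hmax hidx
    have hp : p = arr := by simpa using harr.symm
    subst hp
    exact ⟨k, bv, rfl, hmem, hmax, hidx⟩
  | cons x rest ih =>
    intro p k bv harr hmem hmax hidx
    have harr' : arr = (p ++ [x]) ++ rest := by simp [harr]
    have hlen : ((p.length : Int) + 1) = (((p ++ [x]).length : Nat) : Int) := by simp
    by_cases hcase : x < 0 ∧ x > bv
    · obtain ⟨hneg, hgt⟩ := hcase
      -- x is a new strict max; it cannot occur in p
      have hxnp : x ∉ p := by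
        intro hxp
        have : x ∈ p.filter (fun x => decide (x < 0)) := by
          simp [List.mem_filter, hxp, hneg]
        exact absurd (hmax x this) (by omega)
      have hidx' : PySem.List.index? arr x = some p.length := by
        rw [PySem.List.index?_eq_some_iff]
        exact ⟨p, rest, harr, rfl, hxnp⟩
      have hmem' : x ∈ (p ++ [x]).filter (fun x => decide (x < 0)) := by
        simp [List.filter_append, hneg]
      have hmax' : ∀ y ∈ (p ++ [x]).filter (fun x => decide (x < 0)), y ≤ x := by
        intro y hy
        rw [List.filter_append] at hy
        rcases List.mem_append.mp hy with hy' | hy'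
        · exact le_of_lt (lt_of_le_of_lt (hmax y hy') hgt)
        · simp [hneg] at hy'; omega
      have := ih (p ++ [x]) p.length x harr' hmem' hmax' hidx'
      rw [← hlen] at this
      simpa [bLoop, hneg, hgt] using this
    · -- state unchanged
      have hmem' : bv ∈ (p ++ [x]).filter (fun x => decide (x < 0)) := by
        rw [List.filter_append]
        exact List.mem_append.mpr (Or.inl hmem)
      have hmax' : ∀ y ∈ (p ++ [x]).filter (fun x => decide (x < 0)), y ≤ bv := by
        intro y hy
        rw [List.filter_append] at hy
        rcases List.mem_append.mp hy with hy' | hy'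
        · exact hmax y hy'
        · simp at hy'
          obtain ⟨rfl, hyneg⟩ := hy'
          omega
      have := ih (p ++ [x]) k bv harr' hmem' hmax' hidx
      rw [← hlen] at this
      by_cases hneg : x < 0
      · have hle : ¬ x > bv := fun h => hcase ⟨hneg, h⟩
        simpa [bLoop, hneg, hle] using this
      · simpa [bLoop, hneg] using this

-- B-side start: before the first negative the state is none
lemma bStart (arr : List Int) :
    ∀ (xs p : List Int), arr = p ++ xs →
      p.filter (fun x => decide (x < 0)) = [] →
      (∃ x ∈ xs, x < 0) →
      ∃ (k' : Nat) (bv' : Int),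
        bLoop xs (p.length) none = some ((k' : Int), bv') ∧
        bv' ∈ arr.filter (fun x => decide (x < 0)) ∧
        (∀ y ∈ arr.filter (fun x => decide (x < 0)), y ≤ bv') ∧
        PySem.List.index? arr bv' = some k' := by
  intro xs
  induction xs with
  | nil => intro p _ _ h; simp at h
  | cons x rest ih =>
    intro p harr hpneg hex
    have harr' : arr = (p ++ [x]) ++ rest := by simp [harr]
    have hlen : ((p.length : Int) + 1) = (((p ++ [x]).length : Nat) : Int) := by simp
    by_cases hneg : x < 0
    · have hxnp : x ∉ p := by
        intro hxp
        have : x ∈ p.filter (fun x => decide (x < 0)) := by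
          simp [List.mem_filter, hxp, hneg]
        simp [hpneg] at this
      have hidx' : PySem.List.index? arr x = some p.length := by
        rw [PySem.List.index?_eq_some_iff]
        exact ⟨p, rest, harr, rfl, hxnp⟩
      have hmem' : x ∈ (p ++ [x]).filter (fun x => decide (x < 0)) := by
        simp [List.filter_append, hneg]
      have hmax' : ∀ y ∈ (p ++ [x]).filter (fun x => decide (x < 0)), y ≤ x := by
        intro y hy
        rw [List.filter_append] at hy
        rcases List.mem_append.mp hy with hy' | hy'
        · rw [hpneg] at hy'; simp at hy'
        · simp [hneg] at hy'; omega
      have := bInv arr rest (p ++ [x]) p.length x harr' hmem' hmax' hidx'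
      rw [← hlen] at this
      simpa [bLoop, hneg] using this
    · have hpneg' : (p ++ [x]).filter (fun x => decide (x < 0)) = [] := by
        simp [List.filter_append, hpneg, hneg]
      have hex' : ∃ y ∈ rest, y < 0 := by
        obtain ⟨y, hy, hylt⟩ := hex
        rcases List.mem_cons.mp hy with rfl | hy'
        · exact absurd hylt hneg
        · exact ⟨y, hy', hylt⟩
      have := ih (p ++ [x]) harr' hpneg' hex'
      rw [← hlen] at this
      simpa [bLoop, hneg] using this

-- ===== VERDICT (by name: the statement is the Claim_ definition above) =====
theorem search_max_spec : Claim_equal_search_max := by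
  intro arr _ hpre
  obtain ⟨m0, hm0⟩ := aFirst_isSome arr 0 hpre
  obtain ⟨w, hb⟩ := phase1 arr arr [] m0 rfl (by simpa using hm0)
  obtain ⟨k', bv', hb', hmem', hmax', hidx'⟩ := bStart arr arr [] rfl rfl hpre
  simp at hb hb'
  rw [hb'] at hb
  have hkk : aLoop arr arr 0 m0 = (k' : Int) := by
    have := (Option.some.injEq _ _).mp hb.symm
    exact (Prod.mk.injEq _ _ _ _).mp this |>.1
  -- the filtered list is nonempty, so max? returns its (unique) maximum, which is bv'
  have hne : arr.filter (fun x => decide (x < 0)) ≠ [] := by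
    intro h; rw [h] at hmem'; simp at hmem'
  obtain ⟨m, hmax⟩ : ∃ m, PySem.List.max? (arr.filter (fun x => decide (x < 0))) (fun y => y) = some m := by
    rcases h : PySem.List.max? (arr.filter (fun x => decide (x < 0))) (fun y => y) with _ | m
    · exact absurd ((PySem.List.max?_eq_none_iff _ _).mp h) hne
    · exact ⟨m, rfl⟩
  have hmeq : m = bv' := by
    have h1 : m ≤ bv' := hmax' m (PySem.List.max?_mem hmax)
    have h2 : bv' ≤ m := PySem.List.max?_isMax hmax bv' hmem'
    omega
  unfold Spec_search_max search_max search_max_alt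
  rw [hm0, hmax, hmeq]
  rw [PySem.List.index?_eq_idxOf?] at hidx'
  simp [hidx', hkk]
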